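-- pv_equiv track=rewrite | github.com/gonzalosc2/Learning-Python | CS1_BostonCollege/Midterm_1/my_sixes.py | my_sixes
-- ===== SOURCE A (Python) =====
-- def my_sixes(num):
--     result = 0
--     i = 0
--
--     while i <= num:
--         i += 1
--         if i % 6 == 0 and i % 5 == 0:
--             pass
--         elif i % 6 == 0:
--             result += i
--         else:
--             pass
--
--     return result
-- ===== SOURCE B (Python) =====
-- def my_sixes(num):
--     # closed form: sum of multiples of 6 minus multiples of 30 in [1, num+1]
--     n = num + 1
--     if n < 0:
--         n = 0
--     k6 = n // 6
--     k30 = n // 30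
--     return 3 * k6 * (k6 + 1) - 15 * k30 * (k30 + 1)
-- ===== Notes on version B (the rewrite author's own statement) =====
-- stated objective: faster
-- what changed: Replaced the O(num) counting loop with the closed-form arithmetic-series formula (sum of multiples of 6 up to num+1 minus sum of multiples of 30).
import Mathlib
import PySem

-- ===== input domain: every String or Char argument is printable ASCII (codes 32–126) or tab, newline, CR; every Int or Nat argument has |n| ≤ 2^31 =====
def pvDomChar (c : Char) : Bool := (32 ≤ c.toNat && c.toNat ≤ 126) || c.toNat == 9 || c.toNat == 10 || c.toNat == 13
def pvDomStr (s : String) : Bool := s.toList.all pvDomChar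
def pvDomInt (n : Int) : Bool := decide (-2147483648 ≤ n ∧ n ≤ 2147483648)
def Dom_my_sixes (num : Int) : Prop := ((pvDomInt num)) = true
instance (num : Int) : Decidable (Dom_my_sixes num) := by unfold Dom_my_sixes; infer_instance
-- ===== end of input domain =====

-- B replaces A's O(num) counting loop by the closed-form arithmetic-series formula (objective: faster).


-- ===== PORT A =====
-- the while loop: i += 1 first, then the if/elif/else updating result
def my_sixes_loop (num i result : Int) : Int :=
  if i ≤ num then
    my_sixes_loop num (i + 1)
      (if PySem.Int.mod (i + 1) 6 = 0 ∧ PySem.Int.mod (i + 1) 5 = 0 then result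
       else if PySem.Int.mod (i + 1) 6 = 0 then result + (i + 1)
       else result)
  else result
termination_by (num + 1 - i).toNat
decreasing_by omega

def my_sixes (num : Int) : Int := my_sixes_loop num 0 0

-- ===== PORT B =====
def my_sixes_alt (num : Int) : Int :=
  let n0 := num + 1
  let n := if n0 < 0 then 0 else n0
  let k6 := PySem.Int.floordiv n 6
  let k30 := PySem.Int.floordiv n 30
  3 * k6 * (k6 + 1) - 15 * k30 * (k30 + 1)

-- ===== PRECONDITION & SPEC =====
def Spec_my_sixes (num : Int) (out : Int) : Prop := out = my_sixes_alt num
instance (num : Int) (out : Int) : Decidable (Spec_my_sixes num out) := by unfold Spec_my_sixes; infer_instance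

-- ===== CLAIM (what is proved, stated in full; the proofs are below) =====
def Claim_equal_my_sixes : Prop := ∀ (num : Int), Dom_my_sixes num → Spec_my_sixes num (my_sixes num)

-- ===== LEMMAS AND PROOFS =====

-- the contribution of the last loop iteration (i = num)
def pvContrib (n : Int) : Int :=
  if PySem.Int.mod n 6 = 0 ∧ ¬ PySem.Int.mod n 5 = 0 then n else 0

-- peeling the top iteration off A's loop
theorem my_sixes_loop_peel (k : Nat) :
    ∀ (num i r : Int), (num - i).toNat = k → i ≤ num →
      my_sixes_loop num i r = my_sixes_loop (num - 1) i r + pvContrib (num + 1) := by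
  induction k using Nat.strong_induction_on with
  | _ k ih =>
    intro num i r hk hle
    by_cases h2 : i ≤ num - 1
    · rw [my_sixes_loop, if_pos hle]
      conv_rhs => rw [my_sixes_loop]
      rw [if_pos h2]
      exact ih (num - (i+1)).toNat (by omega) num (i+1) _ rfl (by omega)
    · have hi : i = num := by omega
      subst hi
      rw [my_sixes_loop, if_pos hle]
      rw [my_sixes_loop, if_neg (show ¬ (i + 1 ≤ i) by omega)]
      conv_rhs => rw [my_sixes_loop]
      rw [if_neg h2]
      unfold pvContrib
      by_cases a6 : (6:Int) ∣ (i + 1) <;> by_cases a5 : (5:Int) ∣ (i + 1) <;>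
        simp [a6, a5]

theorem alt_step (num : Int) (h : 0 ≤ num) :
    my_sixes_alt num = my_sixes_alt (num - 1) + pvContrib (num + 1) := by
  simp only [my_sixes_alt, pvContrib]
  rw [show num - 1 + 1 = num by ring]
  rw [if_neg (show ¬ num + 1 < 0 by omega), if_neg (show ¬ num < 0 by omega)]
  simp only [PySem.Int.floordiv_eq_ediv_of_pos (show (0:Int) < 6 by norm_num),
    PySem.Int.floordiv_eq_ediv_of_pos (show (0:Int) < 30 by norm_num),
    PySem.Int.mod_eq_emod_of_pos (show (0:Int) < 6 by norm_num),
    PySem.Int.mod_eq_emod_of_pos (show (0:Int) < 5 by norm_num)]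
  have cop : IsCoprime (5:ℤ) 6 := Int.isCoprime_iff_gcd_eq_one.mpr (by norm_num)
  by_cases h6z : (num+1) % 6 = 0 <;> by_cases h5z : (num+1) % 5 = 0
  · have d30 : (30:ℤ) ∣ (num+1) := by
      have h := cop.mul_dvd (show (5:ℤ) ∣ (num+1) by omega) (show (6:ℤ) ∣ (num+1) by omega)
      simpa using h
    have e6 : (num+1)/6 = num/6 + 1 := by omega
    have e30 : (num+1)/30 = num/30 + 1 := by omega
    have hn : num + 1 = 6*(num/6+1) := by omega
    have hn30 : num + 1 = 30*(num/30+1) := by omega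
    simp only [h6z, h5z, e6, e30, not_true, and_false, if_false]
    linear_combination hn30 - hn
  · have hm30 : (num+1) % 30 ≠ 0 := by
      intro h0
      exact h5z (by
        have : (5:ℤ) ∣ (num+1) := dvd_trans (by norm_num) (Int.dvd_of_emod_eq_zero h0)
        omega)
    have e6 : (num+1)/6 = num/6 + 1 := by omega
    have e30 : (num+1)/30 = num/30 := by omega
    have hn : num + 1 = 6*(num/6+1) := by omega
    simp only [h6z, h5z, e6, e30, not_false_iff, and_self, if_true]
    linear_combination -hn
  · have hm30 : (num+1) % 30 ≠ 0 := by
      intro h0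
      exact h6z (by
        have : (6:ℤ) ∣ (num+1) := dvd_trans (by norm_num) (Int.dvd_of_emod_eq_zero h0)
        omega)
    have e6 : (num+1)/6 = num/6 := by omega
    have e30 : (num+1)/30 = num/30 := by omega
    simp only [h6z, h5z, e6, e30, false_and, if_false]
    ring
  · have hm30 : (num+1) % 30 ≠ 0 := by
      intro h0
      exact h6z (by
        have : (6:ℤ) ∣ (num+1) := dvd_trans (by norm_num) (Int.dvd_of_emod_eq_zero h0)
        omega)
    have e6 : (num+1)/6 = num/6 := by omega
    have e30 : (num+1)/30 = num/30 := by omega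
    simp only [h6z, h5z, e6, e30, false_and, if_false]
    ring

theorem my_sixes_eq (k : Nat) :
    ∀ (num : Int), (num + 1).toNat = k → my_sixes num = my_sixes_alt num := by
  induction k using Nat.strong_induction_on with
  | _ k ih =>
    intro num hk
    by_cases h : 0 ≤ num
    · have h1 : my_sixes num = my_sixes (num - 1) + pvContrib (num + 1) := by
        unfold my_sixes
        exact my_sixes_loop_peel (num - 0).toNat num 0 0 rfl h
      rw [h1, ih (num - 1 + 1).toNat (by omega) (num - 1) rfl, ← alt_step num h]
    · -- num < 0: loop body never runs, closed form clamps to 0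
      rw [my_sixes, my_sixes_loop, if_neg (by omega)]
      unfold my_sixes_alt
      by_cases h0 : num + 1 < 0
      · simp [h0, PySem.Int.floordiv]
      · have : num + 1 = 0 := by omega
        simp [this, PySem.Int.floordiv]

-- ===== VERDICT (by name: the statement is the Claim_ definition above) =====
theorem my_sixes_spec : Claim_equal_my_sixes := by
  intro num _
  exact my_sixes_eq (num + 1).toNat num rfl
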